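-- pv_equiv track=rewrite | github.com/Felix-hans/GenerativeBenchmarking | data/0107_result_sampled_hard/592/592.output_2.py | parse_fractions
-- ===== SOURCE A (Python) =====
-- def parse_fractions(expression: str):
--     fractions = []
--     start = 0
--     for i in range(1, len(expression)):
--         if expression[i] in ['+', '-']:
--             fractions.append(expression[start:i])
--             start = i
--     fractions.append(expression[start:])
--     return fractions
-- ===== SOURCE B (Python) =====
-- def parse_fractions(expression: str):
--     if expression == "":
--         return [""]
--     tokens = [expression[0]]
--     for ch in expression[1:]:
--         if ch in '+-':
--             tokens.append(ch)
--         else: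
--             tokens[-1] += ch
--     return tokens
-- ===== Notes on version B (the rewrite author's own statement) =====
-- stated objective: simpler
-- what changed: Replaces the index/slice loop carrying a start cursor by a single character fold that either opens a new token at a sign or extends the last token in place; no index arithmetic or slicing.
import Mathlib
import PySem

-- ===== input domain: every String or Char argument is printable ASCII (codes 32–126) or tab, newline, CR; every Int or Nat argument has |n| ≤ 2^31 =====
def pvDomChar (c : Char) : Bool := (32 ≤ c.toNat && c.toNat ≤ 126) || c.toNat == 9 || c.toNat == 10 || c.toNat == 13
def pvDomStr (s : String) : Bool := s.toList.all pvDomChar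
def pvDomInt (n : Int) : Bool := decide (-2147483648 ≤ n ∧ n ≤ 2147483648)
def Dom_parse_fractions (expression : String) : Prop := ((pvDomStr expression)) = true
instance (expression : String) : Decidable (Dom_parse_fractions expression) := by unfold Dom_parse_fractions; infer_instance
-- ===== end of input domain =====

-- B replaces A's index/slice loop with a start cursor by a single character fold that
-- opens a new token at each '+'/'-' and otherwise extends the last token (objective: simpler).

-- ===== PORT A =====
-- tokens are kept as List Char during the computation and converted at the output boundary
def parse_fractions (expression : String) : List String :=
  let cs := expression.toList
  let res := (PySem.List.pyRange 1 (cs.length : Int) 1).foldl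
    (fun (st : List (List Char) × Int) i =>
      if PySem.List.pyGet? cs i = some '+' ∨ PySem.List.pyGet? cs i = some '-' then
        (st.1 ++ [PySem.List.slice cs (some st.2) (some i)], i)
      else st)
    ([], 0)
  (res.1 ++ [PySem.List.slice cs (some res.2) none]).map String.ofList

-- ===== PORT B =====
-- one step of B's loop: 'if ch in "+-": tokens.append(ch) else: tokens[-1] += ch'
def pfAltStep (toks : List (List Char)) (ch : Char) : List (List Char) :=
  if ch = '+' ∨ ch = '-' then toks ++ [[ch]]
  else toks.dropLast ++ [PySem.List.pyGetD toks (-1) [] ++ [ch]]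

def parse_fractions_alt (expression : String) : List String :=
  match expression.toList with
  | [] => [""]
  | h :: rest => (rest.foldl pfAltStep [[h]]).map String.ofList

-- ===== PRECONDITION & SPEC =====
def Spec_parse_fractions (expression : String) (out : List String) : Prop := out = parse_fractions_alt expression
instance (expression : String) (out : List String) : Decidable (Spec_parse_fractions expression out) := by unfold Spec_parse_fractions; infer_instance

-- ===== CLAIM (what is proved, stated in full; the proofs are below) =====
def Claim_equal_parse_fractions : Prop := ∀ (expression : String), Dom_parse_fractions expression → Spec_parse_fractions expression (parse_fractions expression)

-- ===== LEMMAS AND PROOFS =====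

-- reference splitter: current token, remaining characters
def pfGo (cur : List Char) : List Char → List (List Char)
  | [] => [cur]
  | c :: cs => if c = '+' ∨ c = '-' then cur :: pfGo [c] cs else pfGo (cur ++ [c]) cs

theorem pfAlt_eq_go (rest : List Char) : ∀ (pre : List (List Char)) (cur : List Char),
    List.foldl pfAltStep (pre ++ [cur]) rest = pre ++ pfGo cur rest := by
  induction rest with
  | nil => intro pre cur; simp [pfGo]
  | cons c cs ih =>
    intro pre cur
    by_cases h : c = '+' ∨ c = '-'
    · simp only [List.foldl_cons, pfAltStep, if_pos h, pfGo]
      rw [ih (pre ++ [cur]) [c]]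
      simp
    · simp only [List.foldl_cons, pfAltStep, if_neg h, pfGo]
      rw [List.dropLast_concat, PySem.List.pyGetD_neg_one_append_singleton, ih pre (cur ++ [c])]

theorem pfA_loop_eq_go (cs : List Char) : ∀ (d k s : Nat), k + d = cs.length → s ≤ k →
    ∀ (fr : List (List Char)),
    (let r := (PySem.List.pyRange (k : Int) (cs.length : Int) 1).foldl
      (fun (st : List (List Char) × Int) i =>
        if PySem.List.pyGet? cs i = some '+' ∨ PySem.List.pyGet? cs i = some '-' then
          (st.1 ++ [PySem.List.slice cs (some st.2) (some i)], i)
        else st) (fr, (s : Int));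
     r.1 ++ [PySem.List.slice cs (some r.2) none])
    = fr ++ pfGo ((cs.drop s).take (k - s)) (cs.drop k) := by
  intro d
  induction d with
  | zero =>
    intro k s hk hs fr
    have hkl : k = cs.length := by omega
    rw [PySem.List.pyRange_one_eq_nil (by exact_mod_cast le_of_eq hkl.symm)]
    simp only [List.foldl_nil]
    rw [PySem.List.slice_from_natCast]
    subst hkl
    rw [List.drop_length, List.take_of_length_le (by simp)]
    simp [pfGo]
  | succ d ih =>
    intro k s hk hs fr
    have hklt : k < cs.length := by omega
    rw [PySem.List.pyRange_one_cons (by exact_mod_cast hklt)]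
    simp only [List.foldl_cons]
    have hget : PySem.List.pyGet? cs (k : Int) = some cs[k] :=
      PySem.List.pyGet?_ofNat cs k hklt
    have hdropk : cs.drop k = cs[k] :: cs.drop (k + 1) := List.drop_eq_getElem_cons hklt
    by_cases h : cs[k] = '+' ∨ cs[k] = '-'
    · rw [hget]
      simp only [Option.some.injEq, if_pos h]
      have h1 : ((k : Int) + 1) = ((k + 1 : Nat) : Int) := by push_cast; ring
      rw [h1, ih (k + 1) k (by omega) (by omega)]
      rw [PySem.List.slice_natCast]
      have h2 : (cs.drop k).take (k + 1 - k) = [cs[k]] := by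
        rw [show k + 1 - k = 1 from by omega, hdropk]
        rfl
      rw [h2, hdropk]
      simp only [pfGo, if_pos h]
      simp
    · rw [hget]
      simp only [Option.some.injEq, if_neg h]
      have h1 : ((k : Int) + 1) = ((k + 1 : Nat) : Int) := by push_cast; ring
      rw [h1, ih (k + 1) s (by omega) (by omega)]
      have h2 : (cs.drop s).take (k + 1 - s) = (cs.drop s).take (k - s) ++ [cs[k]] := by
        have hks : k + 1 - s = (k - s) + 1 := by omega
        have hidx : k - s < (cs.drop s).length := by simp; omega
        rw [hks, List.take_succ, List.getElem?_eq_getElem hidx]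
        simp [List.getElem_drop]
        congr 1
        omega
      rw [h2, hdropk]
      simp only [pfGo, if_neg h]

-- ===== VERDICT (by name: the statement is the Claim_ definition above) =====
theorem parse_fractions_spec : Claim_equal_parse_fractions := by
  intro e _
  unfold Spec_parse_fractions parse_fractions parse_fractions_alt
  cases hcs : e.toList with
  | nil =>
    simp [PySem.List.pyRange_one_eq_nil]
  | cons h rest =>
    simp only
    have hlen : (1 : Nat) + rest.length = (h :: rest).length := by simp; omega
    have := pfA_loop_eq_go (h :: rest) rest.length 1 0 (by simpa using hlen) (by omega) []
    simp only at this
    simp only [Nat.cast_one, Nat.cast_zero] at this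
    rw [this]
    rw [show (List.foldl pfAltStep [[h]] rest) = [] ++ pfGo [h] rest from pfAlt_eq_go rest [] [h]]
    simp
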